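-- pv_equiv track=rewrite | github.com/Odhiambo-20/Biometric-Key-Derivation1 | cross_video_bch_verification4.py | bch_encode
-- ===== SOURCE A (Python) =====
-- def bch_encode(message_bits, g, K, PAR):
--     N = K + PAR
--     assert len(message_bits) == K, f"Expected {K} bits, got {len(message_bits)}"
--     rem = [0] * N
--     for i, b in enumerate(message_bits):
--         rem[PAR + i] = b
--     for i in range(N - 1, PAR - 1, -1):
--         if rem[i] == 0:
--             continue
--         shift = i - PAR
--         for j in range(PAR + 1):
--             rem[shift + j] ^= g[j]
--     return list(message_bits) + rem[:PAR]
-- ===== SOURCE B (Python) =====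
-- def bch_encode(message_bits, g, K, PAR):
--     assert len(message_bits) == K, f"Expected {K} bits, got {len(message_bits)}"
--     taps = list(reversed(g[:PAR]))
--     reg = [0] * PAR
--     for b in reversed(message_bits):
--         if reg:
--             cur = b ^ reg[0]
--             reg = reg[1:] + [0]
--         else:
--             cur = b
--         if cur:
--             reg = [r ^ t for r, t in zip(reg, taps)]
--     return list(message_bits) + reg[::-1]
-- ===== Notes on version B (the rewrite author's own statement) =====
-- stated objective: alternative
-- what changed: Replaces A's length-(K+PAR) scratch array and descending-index in-place polynomial long division with an LFSR systematic encoder threading only a PAR-element parity register over the message bits; Pre_ excludes negative PAR (outside the encoder's natural domain: A's rem[PAR+i] writes and rem[:PAR] slice wrap around via negative indices or raise IndexError), mismatched K (AssertionError), and generators with fewer than PAR+1 coefficients when some message bit is nonzero (IndexError).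
-- outside the precondition, e.g. on bch_encode([1, 0, 1], [1], 3, -1): A returns [1, 0, 1, 0], B returns [1, 0, 1]; on bch_encode([1, 1], [1, 1], 2, -1): A returns [1, 1], B returns [1, 1]
import Mathlib
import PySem

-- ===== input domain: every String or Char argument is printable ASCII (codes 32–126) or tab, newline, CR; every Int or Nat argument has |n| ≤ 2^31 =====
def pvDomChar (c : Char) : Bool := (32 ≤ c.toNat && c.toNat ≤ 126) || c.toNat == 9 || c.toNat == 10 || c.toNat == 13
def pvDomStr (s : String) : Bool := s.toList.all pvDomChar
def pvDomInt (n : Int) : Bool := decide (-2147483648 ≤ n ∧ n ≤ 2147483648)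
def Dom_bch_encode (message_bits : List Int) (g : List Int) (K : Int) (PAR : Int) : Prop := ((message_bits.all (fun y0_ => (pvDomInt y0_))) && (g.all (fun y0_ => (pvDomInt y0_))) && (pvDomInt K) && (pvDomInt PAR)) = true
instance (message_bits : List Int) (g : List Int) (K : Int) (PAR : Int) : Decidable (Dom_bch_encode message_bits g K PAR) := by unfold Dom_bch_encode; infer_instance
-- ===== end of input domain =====

-- B replaces A's length-(K+PAR) scratch array and in-place polynomial long division by an
-- LFSR systematic encoder that threads only a PAR-element parity register over the message
-- bits (alternative decomposition, similar cost).

-- ===== PORT A =====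
-- body of A's outer 'for i in range(N-1, PAR-1, -1)' loop, named so the proofs can speak about it
def pvAStep (g : List Int) (PAR : Int) (rem : List Int) (i : Int) : List Int :=
  if PySem.List.pyGetD rem i 0 = 0 then rem
  else
    let shift := i - PAR
    (PySem.List.pyRange 0 (PAR + 1) 1).foldl
      (fun r j => PySem.List.pySetD r (shift + j)
        (PySem.Int.bxor (PySem.List.pyGetD r (shift + j) 0) (PySem.List.pyGetD g j 0))) rem

def bch_encode (message_bits : List Int) (g : List Int) (K : Int) (PAR : Int) : List Int :=
  let N := K + PAR
  if PySem.List.len message_bits = K then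
    -- rem = [0] * N;  rem[PAR + i] = b for i, b in enumerate(message_bits)
    let rem := PySem.List.pyRepeat [(0 : Int)] N
    let rem := (PySem.List.enumerate message_bits).foldl
      (fun r ib => PySem.List.pySetD r (PAR + ib.1) ib.2) rem
    let rem := (PySem.List.pyRange (N - 1) (PAR - 1) (-1)).foldl (pvAStep g PAR) rem
    message_bits ++ PySem.List.slice rem none (some PAR)
  else []  -- assert fails (AssertionError); excluded by Pre_

-- ===== PORT B =====
-- body of B's 'for b in reversed(message_bits)' loop
def pvBStep (taps : List Int) (reg : List Int) (b : Int) : List Int :=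
  let cr : Int × List Int :=
    match reg with
    | r0 :: _ => (PySem.Int.bxor b r0, PySem.List.slice reg (some 1) none ++ [0])
    | [] => (b, reg)
  if cr.1 ≠ 0 then (cr.2.zip taps).map (fun rt => PySem.Int.bxor rt.1 rt.2) else cr.2

def bch_encode_alt (message_bits : List Int) (g : List Int) (K : Int) (PAR : Int) : List Int :=
  if PySem.List.len message_bits = K then
    let taps := (PySem.List.slice g none (some PAR)).reverse
    let reg := PySem.List.pyRepeat [(0 : Int)] PAR
    let reg := message_bits.reverse.foldl (pvBStep taps) reg
    message_bits ++ reg.reverse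
  else []  -- assert fails (AssertionError); excluded by Pre_

-- ===== PRECONDITION & SPEC =====
-- Pre_ excludes negative PAR (outside the encoder's natural domain: A's rem[PAR+i] writes and
-- rem[:PAR] slice wrap around via negative indices or raise IndexError), mismatched K
-- (AssertionError), and generators with fewer than PAR+1 coefficients when some message bit is
-- nonzero (IndexError in A's inner loop).
def Pre_bch_encode (message_bits : List Int) (g : List Int) (K : Int) (PAR : Int) : Prop :=
  (message_bits.length : Int) = K ∧ 0 ≤ PAR ∧
    ((∀ b ∈ message_bits, b = 0) ∨ PAR + 1 ≤ (g.length : Int))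
instance (message_bits : List Int) (g : List Int) (K : Int) (PAR : Int) : Decidable (Pre_bch_encode message_bits g K PAR) := by unfold Pre_bch_encode; infer_instance

def pvWitness_bch_encode : List Int × List Int × Int × Int := ([1, 0, 1, 1], [1, 0, 1], 4, 2)

def Spec_bch_encode (message_bits : List Int) (g : List Int) (K : Int) (PAR : Int) (out : List Int) : Prop := out = bch_encode_alt message_bits g K PAR
instance (message_bits : List Int) (g : List Int) (K : Int) (PAR : Int) (out : List Int) : Decidable (Spec_bch_encode message_bits g K PAR out) := by unfold Spec_bch_encode; infer_instance

-- ===== CLAIM (what is proved, stated in full; the proofs are below) =====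
def Claim_equal_bch_encode : Prop := ∀ (message_bits : List Int) (g : List Int) (K : Int) (PAR : Int), Dom_bch_encode message_bits g K PAR → Pre_bch_encode message_bits g K PAR → Spec_bch_encode message_bits g K PAR (bch_encode message_bits g K PAR)

-- ===== LEMMAS AND PROOFS =====

-- XOR on Int through a (sign, magnitude-complement) encoding, to get associativity
def pvToSB (n : Int) : Bool × Nat := if 0 ≤ n then (false, n.toNat) else (true, (-n - 1).toNat)
def pvOfSB (s : Bool) (m : Nat) : Int := if s then -(m : Int) - 1 else (m : Int)

lemma pvBxor_sb (a b : Int) :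
    PySem.Int.bxor a b = pvOfSB (xor (pvToSB a).1 (pvToSB b).1) ((pvToSB a).2 ^^^ (pvToSB b).2) := by
  unfold PySem.Int.bxor pvToSB pvOfSB
  split_ifs <;> simp_all

lemma pvToSB_ofSB (s : Bool) (m : Nat) : pvToSB (pvOfSB s m) = (s, m) := by
  cases s <;> simp [pvToSB, pvOfSB]
  omega

lemma pvBxor_assoc (a b c : Int) :
    PySem.Int.bxor (PySem.Int.bxor a b) c = PySem.Int.bxor a (PySem.Int.bxor b c) := by
  rw [pvBxor_sb a b, pvBxor_sb b c, pvBxor_sb (pvOfSB _ _) c, pvBxor_sb a (pvOfSB _ _)]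
  rw [pvToSB_ofSB, pvToSB_ofSB]
  simp [Nat.xor_assoc]

lemma pvBxor_zero_left (a : Int) : PySem.Int.bxor 0 a = a := by
  rw [PySem.Int.bxor_comm]; simp

lemma pvGetD_append_right (xs ys : List Int) (i : Nat) (h1 : xs.length ≤ i)
    (h2 : i < xs.length + ys.length) : (xs ++ ys).getD i 0 = ys.getD (i - xs.length) 0 := by
  rw [List.getD_eq_getElem _ _ (by simp; omega), List.getD_eq_getElem _ _ (by omega),
    List.getElem_append_right h1]

lemma pvFill (msg : List Int) : ∀ (s : Int) (pre rest : List Int), rest.length = msg.length →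
    (PySem.List.enumerate msg s).foldl
      (fun r ib => PySem.List.pySetD r ((pre.length : Int) - s + ib.1) ib.2) (pre ++ rest)
      = pre ++ msg := by
  induction msg with
  | nil =>
    intro s pre rest h
    rw [List.length_eq_zero_iff.mp h]
    simp [PySem.List.enumerate_nil]
  | cons b tl ih =>
    intro s pre rest h
    cases rest with
    | nil => simp at h
    | cons r0 rtl =>
      rw [PySem.List.enumerate_cons]
      simp only [List.foldl_cons]
      have h1 : ((pre.length : Int) - s + s) = ((pre.length : Nat) : Int) := by ring
      rw [h1, PySem.List.pySetD_natCast]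
      have h2 : (pre ++ r0 :: rtl).set pre.length b = (pre ++ [b]) ++ rtl := by
        rw [List.set_append_right _ _ (le_refl _)]
        simp
      rw [h2]
      have h3 : (fun (r : List Int) (ib : Int × Int) => PySem.List.pySetD r ((pre.length : Int) - s + ib.1) ib.2)
          = (fun r ib => PySem.List.pySetD r (((pre ++ [b]).length : Int) - (s+1) + ib.1) ib.2) := by
        funext r ib
        congr 1
        simp only [List.length_append, List.length_cons, List.length_nil]
        push_cast
        ring
      rw [h3, ih (s+1) (pre ++ [b]) rtl (by simpa using h)]
      simp

lemma pvInner_char (g : List Int) (s : Nat) : ∀ (u : Nat) (rem : List Int), s + u ≤ rem.length →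
    (((PySem.List.pyRange 0 (u : Int) 1).foldl
      (fun r j => PySem.List.pySetD r ((s : Int) + j)
        (PySem.Int.bxor (PySem.List.pyGetD r ((s : Int) + j) 0) (PySem.List.pyGetD g j 0))) rem).length = rem.length)
  ∧ ∀ q : Nat, ((PySem.List.pyRange 0 (u : Int) 1).foldl
      (fun r j => PySem.List.pySetD r ((s : Int) + j)
        (PySem.Int.bxor (PySem.List.pyGetD r ((s : Int) + j) 0) (PySem.List.pyGetD g j 0))) rem).getD q 0
      = if s ≤ q ∧ q < s + u then PySem.Int.bxor (rem.getD q 0) (g.getD (q - s) 0) else rem.getD q 0 := by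
  intro u
  induction u with
  | zero =>
    intro rem h
    rw [PySem.List.pyRange_one_eq_nil (by omega)]
    simp only [List.foldl_nil]
    constructor
    · trivial
    · intro q; rw [if_neg (by omega)]
  | succ u ih =>
    intro rem h
    have hcast : ((u + 1 : Nat) : Int) = (u : Int) + 1 := by push_cast; ring
    rw [hcast, PySem.List.pyRange_one_succ_right (by positivity), List.foldl_append]
    obtain ⟨ihl, ihq⟩ := ih rem (by omega)
    simp only [List.foldl_cons, List.foldl_nil]
    have hsu : ((s : Int) + (u : Int)) = ((s + u : Nat) : Int) := by push_cast; ring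
    rw [hsu, PySem.List.pySetD_natCast, PySem.List.pyGetD_natCast, PySem.List.pyGetD_natCast]
    constructor
    · rw [List.length_set, ihl]
    · intro q
      by_cases hq : q = s + u
      · subst hq
        rw [List.getD_eq_getElem?_getD, List.getElem?_set_self (by rw [ihl]; omega), Option.getD_some,
          ihq (s + u), if_neg (by omega)]
        rw [if_pos (by omega)]
        congr 2
        omega
      · rw [List.getD_eq_getElem?_getD, List.getElem?_set_ne (by omega), ← List.getD_eq_getElem?_getD, ihq q]
        by_cases hin : s ≤ q ∧ q < s + u
        · rw [if_pos hin, if_pos (by omega)]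
        · rw [if_neg hin, if_neg (by omega)]

lemma pvGetD_replicate_zero (n : Nat) (i : Int) :
    PySem.List.pyGetD (List.replicate n (0 : Int)) i 0 = 0 := by
  unfold PySem.List.pyGetD
  cases h : PySem.List.pyGet? (List.replicate n (0 : Int)) i with
  | none => rfl
  | some x =>
    have := PySem.List.mem_of_pyGet?_eq_some _ h
    simp at this
    simp [this]
lemma pvAfold_zero (g : List Int) (PAR : Int) (n : Nat) (l : List Int) :
    l.foldl (pvAStep g PAR) (List.replicate n (0 : Int)) = List.replicate n 0 := by
  induction l with
  | nil => rfl
  | cons x xs ih =>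
    rw [List.foldl_cons]
    have : pvAStep g PAR (List.replicate n (0 : Int)) x = List.replicate n 0 := by
      unfold pvAStep
      rw [if_pos (pvGetD_replicate_zero n x)]
    rw [this, ih]
lemma pvBfold_zero (taps : List Int) (p : Nat) (l : List Int) (hl : ∀ x ∈ l, x = (0 : Int)) :
    l.foldl (pvBStep taps) (List.replicate p (0 : Int)) = List.replicate p 0 := by
  induction l with
  | nil => rfl
  | cons x xs ih =>
    rw [List.foldl_cons]
    have hx : x = 0 := hl x (by simp)
    have hstep : pvBStep taps (List.replicate p (0 : Int)) x = List.replicate p 0 := by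
      unfold pvBStep
      cases p with
      | zero => simp [hx]
      | succ q =>
        rw [List.replicate_succ]
        simp only [hx]
        rw [PySem.List.slice_from_one]
        simp
        rw [← List.replicate_succ', ← List.replicate_succ]
    rw [hstep, ih (fun y hy => hl y (by simp [hy]))]

lemma pvGetD_append_last (xs : List Int) (c : Int) : (xs ++ [c]).getD xs.length 0 = c := by
  rw [List.getD_eq_getElem _ _ (by simp)]
  simp
lemma pvGetD_append_at (xs : List Int) (c : Int) (i : Nat) (h : i = xs.length) :
    (xs ++ [c]).getD i 0 = c := by subst h; exact pvGetD_append_last xs c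
lemma pvGetD_append_lt (xs ys : List Int) (i : Nat) (h : i < xs.length) :
    (xs ++ ys).getD i 0 = xs.getD i 0 := by
  rw [List.getD_eq_getElem _ _ (by simp; omega), List.getD_eq_getElem _ _ h,
    List.getElem_append_left h]
lemma pvGetD_zipmap (xs ys : List Int) (i : Nat) (h1 : i < xs.length) (h2 : i < ys.length) :
    ((xs.zip ys).map (fun rt => PySem.Int.bxor rt.1 rt.2)).getD i 0
      = PySem.Int.bxor (xs.getD i 0) (ys.getD i 0) := by
  rw [List.getD_eq_getElem _ _ (by simp; omega), List.getD_eq_getElem _ _ h1,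
    List.getD_eq_getElem _ _ h2]
  simp [List.getElem_zip]
lemma pvBfold_nil (taps : List Int) (l : List Int) : l.foldl (pvBStep taps) [] = [] := by
  induction l with
  | nil => rfl
  | cons x xs ih => rw [List.foldl_cons]; simpa [pvBStep] using ih
lemma pvTaps_len (g : List Int) (p : Nat) (hg : p ≤ g.length) :
    ((PySem.List.slice g none (some (p : Int))).reverse).length = p := by
  rw [PySem.List.slice_to_natCast]
  simp
  omega
lemma pvTaps_getD (g : List Int) (p j : Nat) (hj : j < p) (hg : p ≤ g.length) :
    ((PySem.List.slice g none (some (p : Int))).reverse).getD (p - 1 - j) 0 = g.getD j 0 := by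
  rw [PySem.List.slice_to_natCast]
  rw [List.getD_eq_getElem _ _ (by simp; omega), List.getD_eq_getElem _ _ (by omega)]
  rw [List.getElem_reverse, List.getElem_take]
  congr 1
  simp
  omega

-- pushing the low-window invariant through one step
lemma pvLowSplit (p : Nat) (b : Int) (bsr' rem : List Int)
    (hlow : ∀ q < (b :: bsr').length, rem.getD q 0
      = if q < p then 0 else (b :: bsr').reverse.getD (q - p) 0) :
    ∀ q < bsr'.length, rem.getD q 0 = if q < p then 0 else bsr'.reverse.getD (q - p) 0 := by
  intro q hq
  rw [hlow q (by simp; omega)]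
  by_cases hqp : q < p
  · rw [if_pos hqp, if_pos hqp]
  · rw [if_neg hqp, if_neg hqp, List.reverse_cons,
      pvGetD_append_lt _ _ _ (by simp; omega)]

-- pushing the register-window invariant through one shift of the register
lemma pvHighSplit (p : Nat) (hp : 0 < p) (b : Int) (bsr' rem : List Int) (r0 : Int) (rest : List Int)
    (hrest : rest.length = p - 1)
    (hlow : ∀ q < (b :: bsr').length, rem.getD q 0
      = if q < p then 0 else (b :: bsr').reverse.getD (q - p) 0)
    (hhigh : ∀ j < p, rem.getD ((b :: bsr').length + j) 0
      = PySem.Int.bxor (if (b :: bsr').length + j < p then 0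
          else (b :: bsr').reverse.getD ((b :: bsr').length + j - p) 0)
        ((r0 :: rest).getD (p - 1 - j) 0)) :
    ∀ j < p, rem.getD (bsr'.length + j) 0 =
      PySem.Int.bxor (if bsr'.length + j < p then 0 else bsr'.reverse.getD (bsr'.length + j - p) 0)
        ((rest ++ [0]).getD (p - 1 - j) 0) := by
  intro j hj
  rcases Nat.eq_zero_or_pos j with rfl | hjpos
  · rw [Nat.add_zero, Nat.sub_zero, pvGetD_append_at rest 0 (p - 1) (by omega),
      PySem.Int.bxor_zero, hlow bsr'.length (by simp)]
    by_cases hbp : bsr'.length < p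
    · rw [if_pos hbp, if_pos hbp]
    · rw [if_neg hbp, if_neg hbp, List.reverse_cons,
        pvGetD_append_lt _ _ _ (by simp; omega)]
  · have e := hhigh (j - 1) (by omega)
    rw [show (b :: bsr').length + (j - 1) = bsr'.length + j by simp; omega] at e
    rw [show p - 1 - (j - 1) = (p - 1 - j) + 1 by omega, List.getD_cons_succ] at e
    rw [pvGetD_append_lt _ _ _ (by omega)]
    by_cases hbp : bsr'.length + j < p
    · rw [if_pos hbp]
      rw [if_pos hbp] at e
      exact e
    · rw [if_neg hbp]
      rw [if_neg hbp, List.reverse_cons, pvGetD_append_lt _ _ _ (by simp; omega)] at e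
      exact e

lemma pvMain (p : Nat) (g : List Int) (hg : p + 1 ≤ g.length) :
    ∀ (bsr rem reg : List Int),
    p + bsr.length ≤ rem.length →
    reg.length = p →
    (∀ q, q < bsr.length → rem.getD q 0 = (if q < p then 0 else bsr.reverse.getD (q - p) 0)) →
    (∀ j, j < p → rem.getD (bsr.length + j) 0 =
        PySem.Int.bxor (if bsr.length + j < p then 0 else bsr.reverse.getD (bsr.length + j - p) 0)
          (reg.getD (p - 1 - j) 0)) →
    ((PySem.List.pyRange ((p : Int) + (bsr.length : Int) - 1) ((p : Int) - 1) (-1)).foldl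
        (pvAStep g (p : Int)) rem).take p
      = (bsr.foldl (pvBStep ((PySem.List.slice g none (some (p : Int))).reverse)) reg).reverse := by
  intro bsr
  induction bsr with
  | nil =>
    intro rem reg hlen hreg hlow hhigh
    rw [show ((p : Int) + ((List.length ([] : List Int)) : Int) - 1) = (p : Int) - 1 by simp,
      PySem.List.pyRange_neg_one_eq_nil (le_refl _)]
    simp only [List.foldl_nil]
    apply List.ext_getElem
    · simp [hreg]; omega
    · intro i h1 h2
      have hip : i < p := by rw [List.length_take] at h1; omega
      have e1 := hhigh i hip
      simp only [List.length_nil, Nat.zero_add] at e1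
      rw [if_pos hip, pvBxor_zero_left] at e1
      rw [List.getD_eq_getElem _ _ (by rw [List.length_take] at h1; omega),
        List.getD_eq_getElem _ _ (by rw [hreg]; omega : p - 1 - i < reg.length)] at e1
      rw [List.getElem_take, List.getElem_reverse, e1]
      congr 1
      omega
  | cons b bsr' ih =>
    intro rem reg hlen hreg hlow hhigh
    rw [PySem.List.pyRange_neg_one_cons (by simp only [List.length_cons]; push_cast; omega), List.foldl_cons, List.foldl_cons,
      show (p : Int) + (((b :: bsr').length : Nat) : Int) - 1 - 1
        = (p : Int) + ((bsr'.length : Nat) : Int) - 1 by simp only [List.length_cons]; push_cast; ring]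
    rcases Nat.eq_zero_or_pos p with hp0 | hp0
    · subst hp0
      have hreg0 : reg = [] := List.length_eq_zero_iff.mp hreg
      rw [hreg0]
      have hb0 : pvBStep ((PySem.List.slice g none (some ((0 : Nat) : Int))).reverse) [] b = [] := by
        simp [pvBStep]
      rw [hb0, pvBfold_nil]
      simp
    · obtain ⟨r0, rest, rfl⟩ : ∃ r0 rest, reg = r0 :: rest := by
        cases reg with
        | nil => exfalso; simp at hreg; omega
        | cons a l => exact ⟨a, l, rfl⟩
      have hrest : rest.length = p - 1 := by simp at hreg; omega
      have hstart : ((p : Int) + ((b :: bsr').length : Int) - 1) = ((p + bsr'.length : Nat) : Int) := by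
        simp only [List.length_cons]; push_cast; ring
      have hcur : PySem.List.pyGetD rem ((p : Int) + ((b :: bsr').length : Int) - 1) 0
          = PySem.Int.bxor b r0 := by
        rw [hstart, PySem.List.pyGetD_natCast]
        have e := hhigh (p - 1) (by omega)
        rw [show (b :: bsr').length + (p - 1) = p + bsr'.length by simp only [List.length_cons]; omega,
          if_neg (by omega),
          show p - 1 - (p - 1) = 0 by omega, List.getD_cons_zero, List.reverse_cons,
          pvGetD_append_at _ b _ (by simp only [List.length_reverse]; omega)] at e
        rw [e, PySem.Int.bxor_comm]
      have hBstep : pvBStep ((PySem.List.slice g none (some (p : Int))).reverse) (r0 :: rest) b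
          = if PySem.Int.bxor b r0 ≠ 0 then
              (((rest ++ [0]).zip ((PySem.List.slice g none (some (p : Int))).reverse)).map
                (fun rt : Int × Int => PySem.Int.bxor rt.1 rt.2))
            else rest ++ [0] := by
        simp only [pvBStep, PySem.List.slice_from_one, List.tail_cons]
      by_cases hcz : PySem.Int.bxor b r0 = 0
      · -- skip step on both sides
        have hA : pvAStep g (p : Int) rem ((p : Int) + ((b :: bsr').length : Int) - 1) = rem := by
          simp only [pvAStep]
          rw [if_pos (hcur.trans hcz)]
        rw [hA, hBstep, if_neg (by simpa using hcz)]
        exact ih rem (rest ++ [0]) (by simp at hlen ⊢; omega) (by simp; omega)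
          (pvLowSplit p b bsr' rem hlow)
          (pvHighSplit p hp0 b bsr' rem r0 rest hrest hlow hhigh)
      · -- XOR step on both sides
        have hA : pvAStep g (p : Int) rem ((p : Int) + ((b :: bsr').length : Int) - 1)
            = (PySem.List.pyRange 0 ((p + 1 : Nat) : Int) 1).foldl
                (fun r j => PySem.List.pySetD r ((bsr'.length : Int) + j)
                  (PySem.Int.bxor (PySem.List.pyGetD r ((bsr'.length : Int) + j) 0)
                    (PySem.List.pyGetD g j 0))) rem := by
          simp only [pvAStep]
          rw [if_neg (by rw [hcur]; exact hcz)]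
          have e1 : ((p : Int) + ((b :: bsr').length : Int) - 1 - (p : Int))
              = ((bsr'.length : Nat) : Int) := by simp only [List.length_cons]; push_cast; ring
          have e2 : ((p : Int) + 1) = ((p + 1 : Nat) : Int) := by push_cast; ring
          simp only [e1, e2]
        obtain ⟨hFlen, hFq⟩ := pvInner_char g bsr'.length (p + 1) rem (by simp at hlen; omega)
        rw [hA, hBstep, if_pos (by simpa using hcz)]
        apply ih _ _ (by rw [hFlen]; simp at hlen; omega)
          (by simp [List.length_zip, hrest]; omega)
        · -- low window unchanged
          intro q hq
          rw [hFq q, if_neg (by omega)]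
          exact pvLowSplit p b bsr' rem hlow q hq
        · -- register window
          intro j hj
          rw [hFq (bsr'.length + j), if_pos ⟨by omega, by omega⟩,
            show bsr'.length + j - bsr'.length = j by omega,
            pvHighSplit p hp0 b bsr' rem r0 rest hrest hlow hhigh j hj,
            pvGetD_zipmap _ _ _ (by simp [hrest]) (by rw [pvTaps_len g p (by omega)]; omega),
            pvTaps_getD g p j hj (by omega), pvBxor_assoc]

-- ===== VERDICT (by name: the statement is the Claim_ definition above) =====
theorem bch_encode_spec : Claim_equal_bch_encode := by
  intro message_bits g K PAR _hDom hPre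
  unfold Spec_bch_encode
  obtain ⟨hK, hPAR, hgd⟩ := hPre
  obtain ⟨p, rfl⟩ : ∃ p : Nat, PAR = (p : Int) := ⟨PAR.toNat, (Int.toNat_of_nonneg hPAR).symm⟩
  subst hK
  simp only [bch_encode, bch_encode_alt, PySem.List.len_eq, if_true]
  have hrep2 : PySem.List.pyRepeat [(0 : Int)] ((p : Nat) : Int) = List.replicate p 0 := by
    rw [PySem.List.pyRepeat_singleton]; simp
  have hrep : PySem.List.pyRepeat [(0 : Int)] ((message_bits.length : Int) + ((p : Nat) : Int))
      = List.replicate p 0 ++ List.replicate message_bits.length 0 := by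
    rw [PySem.List.pyRepeat_singleton,
      show (((message_bits.length : Int) + ((p : Nat) : Int))).toNat = p + message_bits.length by omega,
      List.replicate_add]
  have hfill : (PySem.List.enumerate message_bits).foldl
      (fun r ib => PySem.List.pySetD r (((p : Nat) : Int) + ib.1) ib.2)
      (List.replicate p 0 ++ List.replicate message_bits.length 0)
      = List.replicate p 0 ++ message_bits := by
    have h := pvFill message_bits 0 (List.replicate p 0) (List.replicate message_bits.length 0)
      (by simp)
    simpa using h
  rw [hrep2, hrep, hfill, PySem.List.slice_to_natCast]
  rcases hgd with hzero | hglen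
  · -- all message bits are zero: both loops are fixed points
    have hmsg : message_bits = List.replicate message_bits.length 0 := by
      apply List.eq_replicate_of_mem hzero
    rw [show List.replicate p (0 : Int) ++ message_bits
        = List.replicate (p + message_bits.length) 0 by
          rw [List.replicate_add]; exact congrArg _ hmsg,
      pvAfold_zero, pvBfold_zero _ _ _ (by intro x hx; exact hzero x (List.mem_reverse.mp hx)),
      List.take_replicate, List.reverse_replicate]
    congr 2
    omega
  · -- generic case: the register correspondence
    have hg' : p + 1 ≤ g.length := by omega
    have hmain := pvMain p g hg' message_bits.reverse (List.replicate p 0 ++ message_bits)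
      (List.replicate p 0)
      (by simp)
      (by simp)
      (by
        intro q hq
        simp only [List.reverse_reverse]
        by_cases hqp : q < p
        · rw [if_pos hqp, pvGetD_append_lt _ _ _ (by simp; omega),
            List.getD_eq_getElem _ _ (by simp; omega)]
          simp
        · rw [if_neg hqp, pvGetD_append_right _ _ _ (by simp; omega) (by simp at hq ⊢; omega)]
          congr 1
          simp)
      (by
        intro j hj
        simp only [List.reverse_reverse, List.length_reverse]
        rw [List.getD_eq_getElem _ _ (by simp; omega : p - 1 - j < (List.replicate p (0 : Int)).length)]
        simp only [List.getElem_replicate, PySem.Int.bxor_zero]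
        by_cases hqp : message_bits.length + j < p
        · rw [if_pos hqp, pvGetD_append_lt _ _ _ (by simp; omega),
            List.getD_eq_getElem _ _ (by simp; omega)]
          simp
        · rw [if_neg hqp, pvGetD_append_right _ _ _ (by simp; omega) (by simp; omega)]
          congr 1
          simp)
    rw [show ((message_bits.length : Int) + ((p : Nat) : Int) - 1)
        = ((p : Int) + ((message_bits.reverse.length : Nat) : Int) - 1) by simp; ring] at *
    rw [← hmain]
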